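-- pv_equiv track=rewrite | github.com/HeyJunie/GroupStudy | 05_31/08.py | solution
-- ===== SOURCE A (Python) =====
-- def solution(board):
--     while True:
--         crush = set()
--         for i in range(len(board)):
--             for j in range(len(board[0])):
--                 if j > 1 and board[i][j] and board[i][j] == board[i][j-1] == board[i][j-2]:
--                     crush = crush | {(i, j), (i, j-1), (i, j-2)}
--                 if i > 1 and board[i][j] and board[i][j] == board[i-1][j] == board[i-2][j]:
--                     crush = crush | {(i, j), (i-1, j), (i-2, j)}
--
--         if not crush:
--             break
--         for i, j in crush:
--             board[i][j] = 0
--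
--         for j in range(len(board[0])):
--             idx = len(board)-1
--             for i in reversed(range(len(board))):
--                 if board[i][j]:
--                     board[i][j], board[idx][j] = board[idx][j], board[i][j]
--                     # board[idx][j] = board[i][j]
--                     idx -= 1
--             # for i in range(idx + 1):
--             #     board[i][j] = 0
--     return board
-- ===== SOURCE B (Python) =====
-- def solution(board):
--     rows = len(board)
--     cols = len(board[0]) if rows else 0
--     while True:
--         crush = [[False] * cols for _ in range(rows)]
--         found = False
--         for i in range(rows):
--             start = 0
--             for j in range(1, cols + 1):
--                 if j == cols or board[i][j] != board[i][start]:
--                     if board[i][start] != 0 and j - start >= 3: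
--                         found = True
--                         for k in range(start, j):
--                             crush[i][k] = True
--                     start = j
--         for j in range(cols):
--             start = 0
--             for i in range(1, rows + 1):
--                 if i == rows or board[i][j] != board[start][j]:
--                     if board[start][j] != 0 and i - start >= 3:
--                         found = True
--                         for k in range(start, i):
--                             crush[k][j] = True
--                     start = i
--         if not found:
--             return board
--         for i in range(rows):
--             for j in range(cols):
--                 if crush[i][j]:
--                     board[i][j] = 0
--         for j in range(cols):
--             col = [board[i][j] for i in range(rows) if board[i][j] != 0]
--             col = [0] * (rows - len(col)) + col
--             for i in range(rows):
--                 board[i][j] = col[i]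
-- ===== Notes on version B (the rewrite author's own statement) =====
-- stated objective: alternative
-- what changed: Detection replaces A's per-cell 3-window equality checks and incremental set unions with run-length scanning of rows and columns into a boolean mask, and gravity replaces A's bottom-up swap loop with rebuilding each column as zeros followed by its nonzero values in order.
-- outside the precondition, e.g. on solution([[-50, 3], [3]]): A returns [[-50, 3], [3]], B raises IndexError
import Mathlib
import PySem

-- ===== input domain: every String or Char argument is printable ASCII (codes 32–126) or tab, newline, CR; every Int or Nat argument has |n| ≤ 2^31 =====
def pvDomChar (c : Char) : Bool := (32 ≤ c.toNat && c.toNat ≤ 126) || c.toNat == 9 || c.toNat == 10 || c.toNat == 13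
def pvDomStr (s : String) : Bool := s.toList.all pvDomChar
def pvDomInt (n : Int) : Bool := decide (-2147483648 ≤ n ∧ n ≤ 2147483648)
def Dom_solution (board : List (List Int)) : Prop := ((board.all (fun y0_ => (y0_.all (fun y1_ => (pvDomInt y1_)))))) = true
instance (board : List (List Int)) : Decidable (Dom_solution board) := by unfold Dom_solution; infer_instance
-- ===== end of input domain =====

-- B replaces A's per-cell 3-window checks + set unions by run-length scanning into a boolean
-- mask and rebuilds each column (zeros ++ nonzeros) instead of A's bottom-up swap loop; both
-- Pythons mutate `board` in place the same way and return it — the theorems are about the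
-- returned value. Both loops are ported with the same sufficient fuel rows*cols+1.

-- shared indexing primitives (board[i][j] read / write at in-range Nat indices)
def pvCell (b : List (List Int)) (i j : Nat) : Int := (b.getD i []).getD j 0
def pvSet2 (b : List (List Int)) (i j : Nat) (x : Int) : List (List Int) :=
  b.set i ((b.getD i []).set j x)

-- ===== PORT A =====
def pvCrushStep (b : List (List Int)) (i : Nat) (s : PySem.Set (Nat × Nat)) (j : Nat) :
    PySem.Set (Nat × Nat) :=
  let s1 := if 1 < j ∧ pvCell b i j ≠ 0 ∧ pvCell b i j = pvCell b i (j-1) ∧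
               pvCell b i (j-1) = pvCell b i (j-2)
    then PySem.Set.union s [(i,j),(i,j-1),(i,j-2)] else s
  if 1 < i ∧ pvCell b i j ≠ 0 ∧ pvCell b i j = pvCell b (i-1) j ∧
     pvCell b (i-1) j = pvCell b (i-2) j
    then PySem.Set.union s1 [(i,j),(i-1,j),(i-2,j)] else s1

def pvCrushA (b : List (List Int)) (rows cols : Nat) : PySem.Set (Nat × Nat) :=
  (List.range rows).foldl (fun s i => (List.range cols).foldl (pvCrushStep b i) s) PySem.Set.empty

def pvZeroA (b : List (List Int)) (crush : List (Nat × Nat)) : List (List Int) :=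
  crush.foldl (fun b p => pvSet2 b p.1 p.2 0) b

def pvDropStepA (j : Nat) (st : List (List Int) × Nat) (i : Nat) : List (List Int) × Nat :=
  if pvCell st.1 i j ≠ 0 then
    (pvSet2 (pvSet2 st.1 i j (pvCell st.1 st.2 j)) st.2 j (pvCell st.1 i j), st.2 - 1)
  else st

def pvDropColA (b : List (List Int)) (rows j : Nat) : List (List Int) :=
  ((List.range rows).reverse.foldl (pvDropStepA j) (b, rows - 1)).1

def pvGravityA (b : List (List Int)) (rows cols : Nat) : List (List Int) :=
  (List.range cols).foldl (fun b j => pvDropColA b rows j) b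

def pvLoopA : Nat → List (List Int) → List (List Int)
  | 0, b => b
  | fuel+1, b =>
      let crush := pvCrushA b b.length (b.headI).length
      if crush.isEmpty then b
      else pvLoopA fuel (pvGravityA (pvZeroA b crush) b.length (b.headI).length)

def solution (board : List (List Int)) : List (List Int) :=
  pvLoopA (board.length * (board.headI).length + 1) board

-- ===== PORT B =====
def pvMget (m : List (List Bool)) (i j : Nat) : Bool := (m.getD i []).getD j false
def pvMset (m : List (List Bool)) (i j : Nat) : List (List Bool) :=
  m.set i ((m.getD i []).set j true)

-- one step of the run-length scan of row i (Python's body of `for j in range(1, cols+1)`)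
def pvScanRowStep (b : List (List Int)) (cols i : Nat) (st : List (List Bool) × Bool × Nat)
    (j : Nat) : List (List Bool) × Bool × Nat :=
  if j = cols ∨ pvCell b i j ≠ pvCell b i st.2.2 then
    if pvCell b i st.2.2 ≠ 0 ∧ 3 ≤ j - st.2.2 then
      ((List.range' st.2.2 (j - st.2.2)).foldl (fun m k => pvMset m i k) st.1, true, j)
    else (st.1, st.2.1, j)
  else st

def pvScanRowB (b : List (List Int)) (cols i : Nat) (st : List (List Bool) × Bool) :
    List (List Bool) × Bool :=
  let r := (List.range' 1 cols).foldl (pvScanRowStep b cols i) (st.1, st.2, 0)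
  (r.1, r.2.1)

-- one step of the run-length scan of column j (Python's body of `for i in range(1, rows+1)`)
def pvScanColStep (b : List (List Int)) (rows j : Nat) (st : List (List Bool) × Bool × Nat)
    (i : Nat) : List (List Bool) × Bool × Nat :=
  if i = rows ∨ pvCell b i j ≠ pvCell b st.2.2 j then
    if pvCell b st.2.2 j ≠ 0 ∧ 3 ≤ i - st.2.2 then
      ((List.range' st.2.2 (i - st.2.2)).foldl (fun m k => pvMset m k j) st.1, true, i)
    else (st.1, st.2.1, i)
  else st

def pvScanColB (b : List (List Int)) (rows j : Nat) (st : List (List Bool) × Bool) :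
    List (List Bool) × Bool :=
  let r := (List.range' 1 rows).foldl (pvScanColStep b rows j) (st.1, st.2, 0)
  (r.1, r.2.1)

def pvDetectB (b : List (List Int)) (rows cols : Nat) : List (List Bool) × Bool :=
  let st0 : List (List Bool) × Bool := (List.replicate rows (List.replicate cols false), false)
  let st1 := (List.range rows).foldl (fun st i => pvScanRowB b cols i st) st0
  (List.range cols).foldl (fun st j => pvScanColB b rows j st) st1

def pvZeroB (b : List (List Int)) (m : List (List Bool)) (rows cols : Nat) : List (List Int) :=
  (List.range rows).foldl (fun b i =>
    (List.range cols).foldl (fun b j =>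
      if pvMget m i j then pvSet2 b i j 0 else b) b) b

def pvDropColB (b : List (List Int)) (rows j : Nat) : List (List Int) :=
  let col := ((List.range rows).map (fun i => pvCell b i j)).filter (fun x => x ≠ 0)
  let col := List.replicate (rows - col.length) (0 : Int) ++ col
  (List.range rows).foldl (fun b i => pvSet2 b i j (col.getD i 0)) b

def pvGravityB (b : List (List Int)) (rows cols : Nat) : List (List Int) :=
  (List.range cols).foldl (fun b j => pvDropColB b rows j) b

def pvLoopB (rows cols : Nat) : Nat → List (List Int) → List (List Int)
  | 0, b => b
  | fuel+1, b =>
      let d := pvDetectB b rows cols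
      if d.2 = false then b
      else pvLoopB rows cols fuel (pvGravityB (pvZeroB b d.1 rows cols) rows cols)

def solution_alt (board : List (List Int)) : List (List Int) :=
  pvLoopB board.length (board.headI).length (board.length * (board.headI).length + 1) board

-- ===== PRECONDITION & SPEC =====
-- Pre_ excludes ragged boards (a row shorter than the first row): these are outside the natural
-- grid domain; A raises IndexError on them whenever a 3-window check touches the short row, and
-- on tiny boards (at most 2x2) where no window check ever fires A returns the board untouched
-- while B still indexes the full rectangle and raises.
def Pre_solution (board : List (List Int)) : Prop :=
  ∀ r ∈ board, (board.headI).length ≤ r.length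
instance (board : List (List Int)) : Decidable (Pre_solution board) := by
  unfold Pre_solution; infer_instance

def pvWitness_solution : List (List Int) := [[1, 2], [3, 4]]

def Spec_solution (board : List (List Int)) (out : List (List Int)) : Prop := out = solution_alt board
instance (board : List (List Int)) (out : List (List Int)) : Decidable (Spec_solution board out) := by unfold Spec_solution; infer_instance

-- ===== CLAIM (what is proved, stated in full; the proofs are below) =====
def Claim_equal_solution : Prop := ∀ (board : List (List Int)), Dom_solution board → Pre_solution board → Spec_solution board (solution board)

-- ===== LEMMAS AND PROOFS =====

-- generic 2-D getD/set helpers (used for the Int boards of both ports and B's Bool mask)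
lemma getD_set_list {α : Type} (b : List α) (i a : Nat) (r d : α) :
    (b.set i r).getD a d = if i = a ∧ i < b.length then r else b.getD a d := by
  rw [List.getD_eq_getElem?_getD, List.getElem?_set, List.getD_eq_getElem?_getD]
  by_cases hia : i = a
  · subst hia
    by_cases hib : i < b.length <;> simp [hib]
  · simp [hia]

lemma shape_set2 {α : Type} (b : List (List α)) (i j : Nat) (x : α) :
    (b.set i ((b.getD i []).set j x)).map List.length = b.map List.length := by
  rw [List.map_set]
  by_cases h : i < b.length
  · have h1 : ((b.getD i []).set j x).length = (b.map List.length).getD i 0 := by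
      simp [List.getD_eq_getElem?_getD, List.getElem?_map, List.getElem?_eq_getElem h]
    rw [h1]
    have hi : i < (b.map List.length).length := by simpa using h
    rw [show (b.map List.length).getD i 0 = (b.map List.length)[i] from by
      simp [List.getD_eq_getElem?_getD, List.getElem?_eq_getElem hi]]
    exact List.set_getElem_self hi
  · exact List.set_eq_of_length_le (by simpa using Nat.le_of_not_lt h)

lemma getD2_set2 {α : Type} (b : List (List α)) (i j : Nat) (x d : α) (a c : Nat) :
    (((b.set i ((b.getD i []).set j x)).getD a []).getD c d) =
      if i = a ∧ j = c ∧ i < b.length ∧ j < (b.getD i []).length then x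
      else (b.getD a []).getD c d := by
  rw [getD_set_list]
  by_cases hia : i = a
  · subst hia
    by_cases hib : i < b.length
    · rw [if_pos ⟨rfl, hib⟩, getD_set_list]
      by_cases hjc : j = c
      · subst hjc
        by_cases hjr : j < (b.getD i []).length
        · rw [if_pos ⟨rfl, hjr⟩, if_pos ⟨rfl, rfl, hib, hjr⟩]
        · rw [if_neg (by tauto), if_neg (by tauto)]
      · rw [if_neg (by tauto), if_neg (by tauto)]
    · rw [if_neg (by tauto), if_neg (by tauto)]
  · rw [if_neg (by tauto), if_neg (by tauto)]

lemma rowlen_shape {α : Type} (b : List (List α)) (a : Nat) :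
    (b.getD a []).length = (b.map List.length).getD a 0 := by
  by_cases h : a < b.length
  · simp [List.getD_eq_getElem?_getD, List.getElem?_eq_getElem h, List.getElem?_map]
  · rw [List.getD_eq_getElem?_getD, List.getD_eq_getElem?_getD,
      List.getElem?_eq_none (by simpa using Nat.le_of_not_lt h),
      List.getElem?_eq_none (by simpa using Nat.le_of_not_lt h)]
    rfl

def shp (b : List (List Int)) : List Nat := b.map List.length

lemma shp_pvSet2 (b : List (List Int)) (i j : Nat) (x : Int) : shp (pvSet2 b i j x) = shp b :=
  shape_set2 b i j x

lemma pvCell_pvSet2 (b : List (List Int)) (i j : Nat) (x : Int) (a c : Nat) :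
    pvCell (pvSet2 b i j x) a c =
      if i = a ∧ j = c ∧ i < b.length ∧ j < (b.getD i []).length then x else pvCell b a c :=
  getD2_set2 b i j x 0 a c

lemma pvBoard_ext (b b' : List (List Int)) (hs : shp b = shp b')
    (hc : ∀ a c, pvCell b a c = pvCell b' a c) : b = b' := by
  have hlen : b.length = b'.length := by
    have := congrArg List.length hs; simpa [shp] using this
  apply List.ext_getElem hlen
  intro i h1 h2
  have hrow : b[i].length = b'[i].length := by
    have : (shp b)[i]? = (shp b')[i]? := by rw [hs]
    simpa [shp, List.getElem?_map, List.getElem?_eq_getElem h1, List.getElem?_eq_getElem h2] using this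
  apply List.ext_getElem hrow
  intro j hj1 hj2
  have := hc i j
  simpa [pvCell, List.getD_eq_getElem?_getD, List.getElem?_eq_getElem h1, List.getElem?_eq_getElem h2,
    List.getElem?_eq_getElem hj1, List.getElem?_eq_getElem hj2] using this

-- the window / run predicates both detections are measured against
def genHP (f : Nat → Int) (w k : Nat) : Prop :=
  ∃ j, 2 ≤ j ∧ j < w ∧ (k = j ∨ k = j - 1 ∨ k = j - 2) ∧
    f j ≠ 0 ∧ f j = f (j - 1) ∧ f (j - 1) = f (j - 2)

def MarkP (b : List (List Int)) (rows cols a c : Nat) : Prop :=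
  (a < rows ∧ genHP (fun k => pvCell b a k) cols c) ∨
  (c < cols ∧ genHP (fun k => pvCell b k c) rows a)

lemma mem_pvCrushStep (b : List (List Int)) (i j : Nat) (s : PySem.Set (Nat × Nat)) (p : Nat × Nat) :
    p ∈ pvCrushStep b i s j ↔ p ∈ s ∨
      (1 < j ∧ pvCell b i j ≠ 0 ∧ pvCell b i j = pvCell b i (j-1) ∧
        pvCell b i (j-1) = pvCell b i (j-2) ∧ (p = (i,j) ∨ p = (i,j-1) ∨ p = (i,j-2))) ∨
      (1 < i ∧ pvCell b i j ≠ 0 ∧ pvCell b i j = pvCell b (i-1) j ∧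
        pvCell b (i-1) j = pvCell b (i-2) j ∧ (p = (i,j) ∨ p = (i-1,j) ∨ p = (i-2,j))) := by
  unfold pvCrushStep
  by_cases hH : 1 < j ∧ pvCell b i j ≠ 0 ∧ pvCell b i j = pvCell b i (j-1) ∧
      pvCell b i (j-1) = pvCell b i (j-2) <;>
    by_cases hV : 1 < i ∧ pvCell b i j ≠ 0 ∧ pvCell b i j = pvCell b (i-1) j ∧
        pvCell b (i-1) j = pvCell b (i-2) j
  · rw [if_pos hH, if_pos hV]
    simp only [PySem.Set.mem_union, List.mem_cons, List.not_mem_nil, or_false]; tauto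
  · rw [if_pos hH, if_neg hV]
    simp only [PySem.Set.mem_union, List.mem_cons, List.not_mem_nil, or_false]; tauto
  · rw [if_neg hH, if_pos hV]
    simp only [PySem.Set.mem_union, List.mem_cons, List.not_mem_nil, or_false]; tauto
  · rw [if_neg hH, if_neg hV]
    tauto

lemma mem_crushA_inner (b : List (List Int)) (i : Nat) (n : Nat) (s : PySem.Set (Nat × Nat)) (p : Nat × Nat) :
    p ∈ (List.range n).foldl (pvCrushStep b i) s ↔ p ∈ s ∨
      (∃ j, 1 < j ∧ j < n ∧ pvCell b i j ≠ 0 ∧ pvCell b i j = pvCell b i (j-1) ∧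
        pvCell b i (j-1) = pvCell b i (j-2) ∧ (p = (i,j) ∨ p = (i,j-1) ∨ p = (i,j-2))) ∨
      (∃ j, j < n ∧ 1 < i ∧ pvCell b i j ≠ 0 ∧ pvCell b i j = pvCell b (i-1) j ∧
        pvCell b (i-1) j = pvCell b (i-2) j ∧ (p = (i,j) ∨ p = (i-1,j) ∨ p = (i-2,j))) := by
  induction n generalizing s with
  | zero => simp
  | succ n ih =>
    rw [List.range_succ, List.foldl_append, List.foldl_cons, List.foldl_nil, mem_pvCrushStep, ih]
    constructor
    · rintro ((h | ⟨j, h1, h2, h⟩ | ⟨j, h1, h⟩) | h | h)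
      · exact Or.inl h
      · exact Or.inr (Or.inl ⟨j, h1, by omega, h⟩)
      · exact Or.inr (Or.inr ⟨j, by omega, h⟩)
      · exact Or.inr (Or.inl ⟨n, h.1, by omega, h.2⟩)
      · exact Or.inr (Or.inr ⟨n, by omega, h⟩)
    · rintro (h | ⟨j, h1, h2, h⟩ | ⟨j, h1, h⟩)
      · exact Or.inl (Or.inl h)
      · by_cases hjn : j = n
        · subst hjn; exact Or.inr (Or.inl ⟨h1, h⟩)
        · exact Or.inl (Or.inr (Or.inl ⟨j, h1, by omega, h⟩))
      · by_cases hjn : j = n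
        · subst hjn; exact Or.inr (Or.inr h)
        · exact Or.inl (Or.inr (Or.inr ⟨j, by omega, h⟩))

lemma mem_pvCrushA (b : List (List Int)) (rows cols : Nat) (p : Nat × Nat) :
    p ∈ pvCrushA b rows cols ↔ MarkP b rows cols p.1 p.2 := by
  unfold pvCrushA
  have main : ∀ (m : Nat) (s : PySem.Set (Nat × Nat)),
      p ∈ (List.range m).foldl (fun s i => (List.range cols).foldl (pvCrushStep b i) s) s ↔
        p ∈ s ∨
        (∃ i, i < m ∧ ∃ j, 1 < j ∧ j < cols ∧ pvCell b i j ≠ 0 ∧ pvCell b i j = pvCell b i (j-1) ∧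
          pvCell b i (j-1) = pvCell b i (j-2) ∧ (p = (i,j) ∨ p = (i,j-1) ∨ p = (i,j-2))) ∨
        (∃ i, i < m ∧ ∃ j, j < cols ∧ 1 < i ∧ pvCell b i j ≠ 0 ∧ pvCell b i j = pvCell b (i-1) j ∧
          pvCell b (i-1) j = pvCell b (i-2) j ∧ (p = (i,j) ∨ p = (i-1,j) ∨ p = (i-2,j))) := by
    intro m
    induction m with
    | zero => simp
    | succ m ih =>
      intro s
      rw [List.range_succ, List.foldl_append, List.foldl_cons, List.foldl_nil,
        mem_crushA_inner, ih]
      constructor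
      · rintro ((h | h | h) | h | h)
        · exact Or.inl h
        · obtain ⟨i, hi, hrest⟩ := h; exact Or.inr (Or.inl ⟨i, by omega, hrest⟩)
        · obtain ⟨i, hi, hrest⟩ := h; exact Or.inr (Or.inr ⟨i, by omega, hrest⟩)
        · exact Or.inr (Or.inl ⟨m, by omega, h⟩)
        · obtain ⟨j, hj⟩ := h
          exact Or.inr (Or.inr ⟨m, by omega, j, hj.1, hj.2⟩)
      · rintro (h | ⟨i, hi, hrest⟩ | ⟨i, hi, hrest⟩)
        · exact Or.inl (Or.inl h)
        · by_cases him : i = m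
          · subst him; exact Or.inr (Or.inl hrest)
          · exact Or.inl (Or.inr (Or.inl ⟨i, by omega, hrest⟩))
        · by_cases him : i = m
          · subst him
            obtain ⟨j, hj⟩ := hrest
            exact Or.inr (Or.inr ⟨j, hj.1, hj.2⟩)
          · exact Or.inl (Or.inr (Or.inr ⟨i, by omega, hrest⟩))
  rw [main rows PySem.Set.empty]
  unfold MarkP genHP
  constructor
  · rintro (h | ⟨i, hi, j, h1, h2, h3, h4, h5, hp⟩ | ⟨i, hi, j, h1, h2, h3, h4, h5, hp⟩)
    · simp [PySem.Set.empty] at h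
    · refine Or.inl ?_
      rcases hp with hp | hp | hp <;> subst hp <;>
        exact ⟨hi, j, by omega, h2, by tauto⟩
    · refine Or.inr ?_
      rcases hp with hp | hp | hp <;> subst hp <;>
        exact ⟨h1, i, by omega, hi, by simp; tauto⟩
  · rintro (⟨ha, j, hj1, hj2, hjm, hz, he1, he2⟩ | ⟨hc, i, hi1, hi2, him, hz, he1, he2⟩)
    · refine Or.inr (Or.inl ⟨p.1, ha, j, by omega, hj2, hz, he1, he2, ?_⟩)
      rcases hjm with h | h | h <;> simp [Prod.ext_iff, h]
    · refine Or.inr (Or.inr ⟨i, hi2, p.2, hc, by omega, hz, he1, he2, ?_⟩)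
      rcases him with h | h | h <;> simp [Prod.ext_iff, h]

lemma length_pvSet2 (b : List (List Int)) (i j : Nat) (x : Int) :
    (pvSet2 b i j x).length = b.length := by
  simp [pvSet2]

lemma rowlen_pvSet2 (b : List (List Int)) (i j : Nat) (x : Int) (a : Nat) :
    ((pvSet2 b i j x).getD a []).length = (b.getD a []).length := by
  rw [rowlen_shape, rowlen_shape]
  exact congrArg (fun l => l.getD a 0) (shp_pvSet2 b i j x)

lemma shp_pvZeroA (L : List (Nat × Nat)) (b : List (List Int)) :
    shp (pvZeroA b L) = shp b := by
  induction L generalizing b with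
  | nil => rfl
  | cons p L ih =>
    show shp (pvZeroA (pvSet2 b p.1 p.2 0) L) = shp b
    rw [ih, shp_pvSet2]

lemma pvCell_pvZeroA (L : List (Nat × Nat)) (b : List (List Int)) (a c : Nat) :
    pvCell (pvZeroA b L) a c =
      if (a,c) ∈ L ∧ a < b.length ∧ c < (b.getD a []).length then 0 else pvCell b a c := by
  induction L generalizing b with
  | nil => simp [pvZeroA]
  | cons p L ih =>
    rcases p with ⟨u, v⟩
    show pvCell (pvZeroA (pvSet2 b u v 0) L) a c = _
    rw [ih, length_pvSet2, rowlen_pvSet2, pvCell_pvSet2]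
    by_cases hb : a < b.length ∧ c < (b.getD a []).length
    · by_cases hL : (a,c) ∈ L
      · rw [if_pos ⟨hL, hb.1, hb.2⟩, if_pos ⟨List.mem_cons_of_mem _ hL, hb.1, hb.2⟩]
      · rw [if_neg (by tauto)]
        by_cases huv : u = a ∧ v = c
        · rw [if_pos ⟨huv.1, huv.2, huv.1 ▸ hb.1, by rw [huv.1]; exact huv.2 ▸ hb.2⟩,
            if_pos ⟨by rw [List.mem_cons]; exact Or.inl (by simp [huv.1, huv.2]), hb.1, hb.2⟩]
        · rw [if_neg (by tauto),
            if_neg (by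
              rintro ⟨hm, -⟩
              rcases List.mem_cons.mp hm with h | h
              · exact huv ⟨(Prod.ext_iff.mp h).1.symm, (Prod.ext_iff.mp h).2.symm⟩
              · exact hL h)]
    · rw [if_neg (by tauto),
        if_neg (by rintro ⟨rfl, rfl, h3, h4⟩; exact hb ⟨h3, h4⟩),
        if_neg (by tauto)]

-- mask infrastructure
def MS (rows cols : Nat) (m : List (List Bool)) : Prop :=
  m.map List.length = List.replicate rows cols

lemma MS_init (rows cols : Nat) : MS rows cols (List.replicate rows (List.replicate cols false)) := by
  simp [MS, List.map_replicate]

lemma MS_pvMset (rows cols : Nat) (m : List (List Bool)) (i k : Nat) (h : MS rows cols m) :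
    MS rows cols (pvMset m i k) := by
  unfold MS pvMset
  rw [shape_set2]; exact h

lemma MS_length (rows cols : Nat) (m : List (List Bool)) (h : MS rows cols m) : m.length = rows := by
  have := congrArg List.length h; simpa using this

lemma MS_rowlen (rows cols : Nat) (m : List (List Bool)) (h : MS rows cols m) (a : Nat)
    (ha : a < rows) : (m.getD a []).length = cols := by
  rw [rowlen_shape, h, List.getD_eq_getElem?_getD, List.getElem?_replicate]
  simp [ha]

lemma pvMget_pvMset (m : List (List Bool)) (i k a c : Nat) :
    pvMget (pvMset m i k) a c =
      if i = a ∧ k = c ∧ i < m.length ∧ k < (m.getD i []).length then true else pvMget m a c :=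
  getD2_set2 m i k true false a c

lemma pvMget_pvMset_char (rows cols : Nat) (m : List (List Bool)) (i k a c : Nat)
    (h : MS rows cols m) (hi : i < rows) (hk : k < cols) :
    (pvMget (pvMset m i k) a c = true ↔ pvMget m a c = true ∨ (a, c) = (i, k)) := by
  rw [pvMget_pvMset]
  by_cases hic : i = a ∧ k = c
  · rw [if_pos ⟨hic.1, hic.2, by rw [MS_length rows cols m h]; exact hi,
      by rw [MS_rowlen rows cols m h i (by omega)]; exact hk⟩]
    simp [Prod.ext_iff, hic.1, hic.2]
  · rw [if_neg (by tauto)]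
    simp only [Prod.ext_iff]
    constructor
    · exact Or.inl
    · rintro (hg | ⟨rfl, rfl⟩)
      · exact hg
      · exact absurd ⟨rfl, rfl⟩ hic

lemma zeroB_inner (m : List (List Bool)) (i : Nat) (n : Nat) (b : List (List Int)) (a c : Nat) :
    shp ((List.range n).foldl (fun b j => if pvMget m i j then pvSet2 b i j 0 else b) b) = shp b ∧
    pvCell ((List.range n).foldl (fun b j => if pvMget m i j then pvSet2 b i j 0 else b) b) a c =
      if i = a ∧ c < n ∧ pvMget m i c = true ∧ i < b.length ∧ c < (b.getD i []).length then 0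
      else pvCell b a c := by
  induction n with
  | zero => simp
  | succ n ih =>
    rw [List.range_succ, List.foldl_append, List.foldl_cons, List.foldl_nil]
    obtain ⟨ihs, ihc⟩ := ih
    have hlen : ((List.range n).foldl (fun b j => if pvMget m i j then pvSet2 b i j 0 else b) b).length = b.length := by
      have := congrArg List.length ihs; simpa [shp] using this
    have hrow : ∀ a', (((List.range n).foldl (fun b j => if pvMget m i j then pvSet2 b i j 0 else b) b).getD a' []).length = (b.getD a' []).length := by
      intro a'
      rw [rowlen_shape, rowlen_shape]
      exact congrArg (fun l => l.getD a' 0) ihs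
    by_cases hg : pvMget m i n = true
    · rw [if_pos hg]
      refine ⟨by rw [shp_pvSet2]; exact ihs, ?_⟩
      rw [pvCell_pvSet2, hlen, hrow, ihc]
      by_cases hia : i = a
      · subst hia
        by_cases hcn : n = c
        · subst hcn
          by_cases hb : i < b.length ∧ n < (b.getD i []).length
          · rw [if_pos ⟨rfl, rfl, hb.1, hb.2⟩, if_pos ⟨rfl, by omega, hg, hb.1, hb.2⟩]
          · rw [if_neg (by tauto), if_neg (by rintro ⟨-, h2, -⟩; omega),
              if_neg (by rintro ⟨-, -, -, h4, h5⟩; exact hb ⟨h4, h5⟩)]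
        · rw [if_neg (by tauto)]
          by_cases hC : c < n ∧ pvMget m i c = true ∧ i < b.length ∧ c < (b.getD i []).length
          · rw [if_pos ⟨rfl, hC.1, hC.2.1, hC.2.2.1, hC.2.2.2⟩,
              if_pos ⟨rfl, by omega, hC.2.1, hC.2.2.1, hC.2.2.2⟩]
          · rw [if_neg (by rintro ⟨-, h2, h3, h4, h5⟩; exact hC ⟨h2, h3, h4, h5⟩),
              if_neg (by rintro ⟨-, h2, h3, h4, h5⟩; exact hC ⟨by omega, h3, h4, h5⟩)]
      · rw [if_neg (by tauto), if_neg (by tauto), if_neg (by tauto)]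
    · rw [if_neg hg]
      refine ⟨ihs, ?_⟩
      rw [ihc]
      by_cases hia : i = a
      · subst hia
        by_cases hcn : c = n
        · subst hcn
          rw [if_neg (by rintro ⟨-, h2, -⟩; omega), if_neg (by rintro ⟨-, -, h3, -⟩; exact hg h3)]
        · by_cases hC : c < n ∧ pvMget m i c = true ∧ i < b.length ∧ c < (b.getD i []).length
          · rw [if_pos ⟨rfl, hC.1, hC.2.1, hC.2.2.1, hC.2.2.2⟩,
              if_pos ⟨rfl, by omega, hC.2.1, hC.2.2.1, hC.2.2.2⟩]
          · rw [if_neg (by rintro ⟨-, h2, h3, h4, h5⟩; exact hC ⟨h2, h3, h4, h5⟩),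
              if_neg (by rintro ⟨-, h2, h3, h4, h5⟩; exact hC ⟨by omega, h3, h4, h5⟩)]
      · rw [if_neg (by tauto), if_neg (by tauto)]

lemma pvZeroB_spec (b : List (List Int)) (m : List (List Bool)) (rows cols : Nat) (a c : Nat) :
    shp (pvZeroB b m rows cols) = shp b ∧
    pvCell (pvZeroB b m rows cols) a c =
      if (a < rows ∧ c < cols ∧ pvMget m a c = true) ∧ a < b.length ∧ c < (b.getD a []).length then 0
      else pvCell b a c := by
  unfold pvZeroB
  induction rows with
  | zero => simp
  | succ n ih =>
    rw [List.range_succ, List.foldl_append, List.foldl_cons, List.foldl_nil]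
    obtain ⟨ihs, ihc⟩ := ih
    have hlen : ((List.range n).foldl (fun b i => (List.range cols).foldl (fun b j => if pvMget m i j then pvSet2 b i j 0 else b) b) b).length = b.length := by
      have := congrArg List.length ihs; simpa [shp] using this
    have hrow : ∀ a', (((List.range n).foldl (fun b i => (List.range cols).foldl (fun b j => if pvMget m i j then pvSet2 b i j 0 else b) b) b).getD a' []).length = (b.getD a' []).length := by
      intro a'
      rw [rowlen_shape, rowlen_shape]
      exact congrArg (fun l => l.getD a' 0) ihs
    obtain ⟨zs, zc⟩ := zeroB_inner m n cols
      ((List.range n).foldl (fun b i => (List.range cols).foldl (fun b j => if pvMget m i j then pvSet2 b i j 0 else b) b) b) a c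
    refine ⟨by rw [zs]; exact ihs, ?_⟩
    rw [zc, hlen, hrow, ihc]
    by_cases hna : n = a
    · subst hna
      by_cases hC : c < cols ∧ pvMget m n c = true ∧ n < b.length ∧ c < (b.getD n []).length
      · rw [if_pos ⟨rfl, hC.1, hC.2.1, hC.2.2.1, hC.2.2.2⟩,
          if_pos ⟨⟨by omega, hC.1, hC.2.1⟩, hC.2.2.1, hC.2.2.2⟩]
      · rw [if_neg (by rintro ⟨-, h2, h3, h4, h5⟩; exact hC ⟨h2, h3, h4, h5⟩),
          if_neg (by rintro ⟨⟨-, h1, h2⟩, h4, h5⟩; exact hC ⟨h1, h2, h4, h5⟩),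
          if_neg (by rintro ⟨⟨-, h1, h2⟩, h4, h5⟩; exact hC ⟨h1, h2, h4, h5⟩)]
    · rw [if_neg (by tauto)]
      by_cases hC : (a < n ∧ c < cols ∧ pvMget m a c = true) ∧ a < b.length ∧ c < (b.getD a []).length
      · rw [if_pos hC, if_pos ⟨⟨by omega, hC.1.2⟩, hC.2⟩]
      · rw [if_neg hC, if_neg (by rintro ⟨⟨h0, hrest⟩, hb⟩; exact hC ⟨⟨by omega, hrest⟩, hb⟩)]

lemma genHP_lt (f : Nat → Int) (w k : Nat) (h : genHP f w k) : k < w := by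
  obtain ⟨j, h1, h2, h3, -⟩ := h; omega

lemma runL1 (f : Nat → Int) (w start t : Nat) (htw : t ≤ w)
    (hI2 : ∀ x, start ≤ x → x < t → f x = f start) (hnz : f start ≠ 0) (hlen : 3 ≤ t - start) :
    ∀ c, start ≤ c → c < t → genHP f w c := by
  intro c hc1 hc2
  have heq : ∀ x y, start ≤ x → x < t → start ≤ y → y < t → f x = f y := fun x y hx1 hx2 hy1 hy2 =>
    (hI2 x hx1 hx2).trans (hI2 y hy1 hy2).symm
  by_cases hcc : start + 2 ≤ c
  · exact ⟨c, by omega, by omega, by omega,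
      by rw [hI2 c hc1 hc2]; exact hnz,
      heq c (c-1) hc1 hc2 (by omega) (by omega),
      heq (c-1) (c-2) (by omega) (by omega) (by omega) (by omega)⟩
  · exact ⟨start + 2, by omega, by omega, by omega,
      by rw [hI2 (start+2) (by omega) (by omega)]; exact hnz,
      heq (start+2) (start+2-1) (by omega) (by omega) (by omega) (by omega),
      heq (start+2-1) (start+2-2) (by omega) (by omega) (by omega) (by omega)⟩

lemma runL2 (f : Nat → Int) (w start t : Nat) (hts : start < t) (htw : t ≤ w)
    (hI2 : ∀ x, start ≤ x → x < t → f x = f start)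
    (hI3 : start = 0 ∨ f (start - 1) ≠ f start)
    (hcond : t = w ∨ f t ≠ f start)
    (hnm : ¬(f start ≠ 0 ∧ 3 ≤ t - start)) :
    ∀ k, start ≤ k → genHP f w k → t ≤ k := by
  intro k hk hg
  obtain ⟨j, hj2, hjw, hmem, hnz, he1, he2⟩ := hg
  by_contra hlt
  push_neg at hlt
  -- the window's left end cannot cross the run boundary at `start`
  have hj2s : start ≤ j - 2 := by
    by_contra h
    push_neg at h
    have hs0 : start ≠ 0 := by omega
    rcases hI3 with h0 | hne
    · exact hs0 h0
    · have hcase : start = j - 1 ∨ start = j := by omega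
      rcases hcase with h1 | h1
      · have e1 : start - 1 = j - 2 := by omega
        rw [e1, h1] at hne
        exact hne he2.symm
      · have e1 : start - 1 = j - 1 := by omega
        rw [e1, h1] at hne
        exact hne he1.symm
  -- the window cannot cross the boundary at `t` either
  have hjt : j < t := by
    by_contra h
    push_neg at h
    have hcase : t = j - 1 ∨ t = j := by omega
    have htw' : t < w := by omega
    have hft : f t ≠ f start := by
      rcases hcond with h' | h'
      · omega
      · exact h'
    have hft1 : f (t - 1) = f start := hI2 (t-1) (by omega) (by omega)
    rcases hcase with h1 | h1
    · have e1 : t - 1 = j - 2 := by omega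
      rw [h1] at hft
      rw [e1] at hft1
      exact hft (he2.trans hft1)
    · have e1 : t - 1 = j - 1 := by omega
      rw [h1] at hft
      rw [e1] at hft1
      exact hft (he1.trans hft1)
  -- so the window lies inside [start, t): the run is long and nonzero, contradiction
  apply hnm
  constructor
  · rw [← hI2 j (by omega) (by omega)]; exact hnz
  · omega

lemma markAll_spec {M : Type} (get : M → Nat → Nat → Bool) (mark : M → Nat → M)
    (pos : Nat → Nat × Nat) (S : M → Prop) (w : Nat)
    (hS : ∀ m k, S m → k < w → S (mark m k))
    (hmark : ∀ m k a c, S m → k < w →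
      (get (mark m k) a c = true ↔ get m a c = true ∨ (a, c) = pos k)) :
    ∀ (l : List Nat) (m : M), S m → (∀ k ∈ l, k < w) →
      S (l.foldl mark m) ∧
      ∀ a c, (get (l.foldl mark m) a c = true ↔ get m a c = true ∨ ∃ k ∈ l, (a,c) = pos k) := by
  intro l
  induction l with
  | nil =>
    intro m hm _
    exact ⟨hm, fun a c => by simp⟩
  | cons x l ih =>
    intro m hm hl
    have hx : x < w := hl x (List.mem_cons_self ..)
    obtain ⟨hS', hg⟩ := ih (mark m x) (hS m x hm hx) (fun k hk => hl k (List.mem_cons_of_mem _ hk))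
    refine ⟨hS', fun a c => ?_⟩
    rw [List.foldl_cons, hg a c, hmark m x a c hm hx]
    simp only [List.mem_cons]
    constructor
    · rintro ((h | h) | ⟨k, hk1, hk2⟩)
      · exact Or.inl h
      · exact Or.inr ⟨x, Or.inl rfl, h⟩
      · exact Or.inr ⟨k, Or.inr hk1, hk2⟩
    · rintro (h | ⟨k, hk1 | hk1, hk2⟩)
      · exact Or.inl (Or.inl h)
      · subst hk1; exact Or.inl (Or.inr hk2)
      · exact Or.inr ⟨k, hk1, hk2⟩

lemma scan_go {M : Type} (get : M → Nat → Nat → Bool) (mark : M → Nat → M)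
    (pos : Nat → Nat × Nat) (S : M → Prop) (w : Nat) (f : Nat → Int)
    (step : M × Bool × Nat → Nat → M × Bool × Nat)
    (hS : ∀ m k, S m → k < w → S (mark m k))
    (hmark : ∀ m k a c, S m → k < w →
      (get (mark m k) a c = true ↔ get m a c = true ∨ (a, c) = pos k))
    (hstep : ∀ st j, step st j =
      if j = w ∨ f j ≠ f st.2.2 then
        if f st.2.2 ≠ 0 ∧ 3 ≤ j - st.2.2 then
          ((List.range' st.2.2 (j - st.2.2)).foldl mark st.1, true, j)
        else (st.1, st.2.1, j)
      else st) :
    ∀ (n t : Nat) (m : M) (found : Bool) (start : Nat),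
      t + n = w + 1 → 1 ≤ t → t ≤ w → start < t →
      (∀ x, start ≤ x → x < t → f x = f start) →
      (start = 0 ∨ f (start - 1) ≠ f start) →
      S m →
      S ((List.range' t n).foldl step (m, found, start)).1 ∧
      (∀ a c, get ((List.range' t n).foldl step (m, found, start)).1 a c = true ↔
        get m a c = true ∨ ∃ k, start ≤ k ∧ genHP f w k ∧ (a,c) = pos k) ∧
      (((List.range' t n).foldl step (m, found, start)).2.1 = true ↔
        found = true ∨ ∃ k, start ≤ k ∧ genHP f w k) := by
  intro n
  induction n with
  | zero => intro t m found start h1 h2 h3; omega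
  | succ n ih =>
    intro t m found start hw h1 h3 h4 hI2 hI3 hm
    rw [List.range'_succ, List.foldl_cons, hstep]
    have hred : (if t = w ∨ f t ≠ f ((m, found, start) : M × Bool × Nat).2.2 then
        if f ((m, found, start) : M × Bool × Nat).2.2 ≠ 0 ∧ 3 ≤ t - ((m, found, start) : M × Bool × Nat).2.2 then
          ((List.range' ((m, found, start) : M × Bool × Nat).2.2 (t - ((m, found, start) : M × Bool × Nat).2.2)).foldl mark ((m, found, start) : M × Bool × Nat).1, true, t)
        else (((m, found, start) : M × Bool × Nat).1, ((m, found, start) : M × Bool × Nat).2.1, t)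
      else (m, found, start)) =
      (if t = w ∨ f t ≠ f start then
        if f start ≠ 0 ∧ 3 ≤ t - start then
          ((List.range' start (t - start)).foldl mark m, true, t)
        else (m, found, t)
      else (m, found, start)) := rfl
    rw [hred]
    by_cases hcond : t = w ∨ f t ≠ f start
    · rw [if_pos hcond]
      by_cases hmk : f start ≠ 0 ∧ 3 ≤ t - start
      · rw [if_pos hmk]
        obtain ⟨hS1, hg1⟩ := markAll_spec get mark pos S w hS hmark
          (List.range' start (t - start)) m hm
          (fun k hk => by rw [List.mem_range'_1] at hk; omega)
        have hL1 := runL1 f w start t h3 hI2 hmk.1 hmk.2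
        have claimget : ∀ a c,
            get ((List.range' start (t - start)).foldl mark m) a c = true ↔
              get m a c = true ∨ ∃ k, start ≤ k ∧ k < t ∧ genHP f w k ∧ (a,c) = pos k := by
          intro a c
          rw [hg1 a c]
          constructor
          · rintro (h | ⟨k, hk1, hk2⟩)
            · exact Or.inl h
            · rw [List.mem_range'_1] at hk1
              exact Or.inr ⟨k, by omega, by omega, hL1 k (by omega) (by omega), hk2⟩
          · rintro (h | ⟨k, hk1, hk2, hk3, hk4⟩)
            · exact Or.inl h
            · exact Or.inr ⟨k, by rw [List.mem_range'_1]; omega, hk4⟩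
        rcases n with _ | n
        · -- t = w: last position of the row, nothing left to scan
          have htw : t = w := by omega
          simp only [List.range'_zero, List.foldl_nil]
          refine ⟨hS1, fun a c => ?_, ?_⟩
          · rw [claimget a c]
            constructor
            · rintro (h | ⟨k, hk1, hk2, hk3, hk4⟩)
              · exact Or.inl h
              · exact Or.inr ⟨k, hk1, hk3, hk4⟩
            · rintro (h | ⟨k, hk1, hk3, hk4⟩)
              · exact Or.inl h
              · exact Or.inr ⟨k, hk1, by have := genHP_lt f w k hk3; omega, hk3, hk4⟩
          · constructor
            · intro
              exact Or.inr ⟨start, le_refl _, hL1 start (le_refl _) (by omega)⟩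
            · intro _; trivial
        · -- continue with start := t
          have hcond' : f t ≠ f start := by
            rcases hcond with h | h
            · omega
            · exact h
          obtain ⟨ihS, ihget, ihfound⟩ := ih (t+1)
            ((List.range' start (t - start)).foldl mark m) true t (by omega) (by omega)
            (by omega) (by omega)
            (fun x hx1 hx2 => by rw [show x = t from by omega])
            (Or.inr (by
              have e : t + 1 - 1 = t := by omega
              intro hcontra
              have ht1 : f (t - 1) = f start := hI2 (t-1) (by omega) (by omega)
              exact hcond' (by rw [← hcontra]; exact ht1)))
            hS1
          refine ⟨ihS, fun a c => ?_, ?_⟩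
          · rw [ihget a c, claimget a c]
            constructor
            · rintro ((h | ⟨k, hk1, hk2, hk3, hk4⟩) | ⟨k, hk1, hk2, hk3⟩)
              · exact Or.inl h
              · exact Or.inr ⟨k, hk1, hk3, hk4⟩
              · exact Or.inr ⟨k, by omega, hk2, hk3⟩
            · rintro (h | ⟨k, hk1, hk2, hk3⟩)
              · exact Or.inl (Or.inl h)
              · by_cases hkt : k < t
                · exact Or.inl (Or.inr ⟨k, hk1, hkt, hk2, hk3⟩)
                · exact Or.inr ⟨k, by omega, hk2, hk3⟩
          · rw [ihfound]
            constructor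
            · rintro (h | ⟨k, hk1, hk2⟩)
              · exact Or.inr ⟨start, le_refl _, hL1 start (le_refl _) (by omega)⟩
              · exact Or.inr ⟨k, by omega, hk2⟩
            · intro
              exact Or.inl rfl
      · rw [if_neg hmk]
        have hL2 := runL2 f w start t h4 h3 hI2 hI3 hcond hmk
        rcases n with _ | n
        · have htw : t = w := by omega
          simp only [List.range'_zero, List.foldl_nil]
          refine ⟨hm, fun a c => ?_, ?_⟩
          · constructor
            · exact fun h => Or.inl h
            · rintro (h | ⟨k, hk1, hk2, hk3⟩)
              · exact h
              · have := hL2 k hk1 hk2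
                have := genHP_lt f w k hk2
                omega
          · constructor
            · exact fun h => Or.inl h
            · rintro (h | ⟨k, hk1, hk2⟩)
              · exact h
              · have := hL2 k hk1 hk2
                have := genHP_lt f w k hk2
                omega
        · have hcond' : f t ≠ f start := by
            rcases hcond with h | h
            · omega
            · exact h
          obtain ⟨ihS, ihget, ihfound⟩ := ih (t+1) m found t (by omega) (by omega)
            (by omega) (by omega)
            (fun x hx1 hx2 => by rw [show x = t from by omega])
            (Or.inr (by
              intro hcontra
              have ht1 : f (t - 1) = f start := hI2 (t-1) (by omega) (by omega)
              exact hcond' (by rw [← hcontra]; exact ht1)))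
            hm
          refine ⟨ihS, fun a c => ?_, ?_⟩
          · rw [ihget a c]
            constructor
            · rintro (h | ⟨k, hk1, hk2, hk3⟩)
              · exact Or.inl h
              · exact Or.inr ⟨k, by omega, hk2, hk3⟩
            · rintro (h | ⟨k, hk1, hk2, hk3⟩)
              · exact Or.inl h
              · exact Or.inr ⟨k, hL2 k hk1 hk2, hk2, hk3⟩
          · rw [ihfound]
            constructor
            · rintro (h | ⟨k, hk1, hk2⟩)
              · exact Or.inl h
              · exact Or.inr ⟨k, by omega, hk2⟩
            · rintro (h | ⟨k, hk1, hk2⟩)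
              · exact Or.inl h
              · exact Or.inr ⟨k, hL2 k hk1 hk2, hk2⟩
    · rw [if_neg hcond]
      push_neg at hcond
      obtain ⟨htw, hft⟩ := hcond
      obtain ⟨ihS, ihget, ihfound⟩ := ih (t+1) m found start (by omega) (by omega)
        (by omega) (by omega)
        (fun x hx1 hx2 => by
          by_cases hxt : x = t
          · rw [hxt]; exact hft
          · exact hI2 x hx1 (by omega))
        hI3 hm
      exact ⟨ihS, ihget, ihfound⟩

lemma pvScanRowB_spec (b : List (List Int)) (rows cols i : Nat) (hi : i < rows)
    (m : List (List Bool)) (found : Bool) (hm : MS rows cols m) :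
    MS rows cols (pvScanRowB b cols i (m, found)).1 ∧
    (∀ a c, pvMget (pvScanRowB b cols i (m, found)).1 a c = true ↔
      pvMget m a c = true ∨ (a = i ∧ genHP (fun k => pvCell b i k) cols c)) ∧
    ((pvScanRowB b cols i (m, found)).2 = true ↔
      found = true ∨ ∃ k, genHP (fun k => pvCell b i k) cols k) := by
  rcases Nat.eq_zero_or_pos cols with hc | hc
  · subst hc
    refine ⟨hm, fun a c => ?_, ?_⟩
    · show pvMget m a c = true ↔ _
      constructor
      · exact fun h => Or.inl h
      · rintro (h | ⟨-, hg⟩)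
        · exact h
        · exact absurd (genHP_lt _ 0 c hg) (by omega)
    · show found = true ↔ _
      constructor
      · exact fun h => Or.inl h
      · rintro (h | ⟨k, hg⟩)
        · exact h
        · exact absurd (genHP_lt _ 0 k hg) (by omega)
  · obtain ⟨hS1, hg1, hf1⟩ := scan_go pvMget (fun m k => pvMset m i k) (fun k => (i, k))
      (MS rows cols) cols (fun k => pvCell b i k) (pvScanRowStep b cols i)
      (fun m k hm hk => MS_pvMset rows cols m i k hm)
      (fun m k a c hm hk => pvMget_pvMset_char rows cols m i k a c hm hi hk)
      (fun st j => rfl)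
      cols 1 m found 0 (by omega) (by omega) (by omega) (by omega)
      (fun x hx1 hx2 => by rw [show x = 0 from by omega])
      (Or.inl rfl) hm
    refine ⟨hS1, fun a c => ?_, hf1.trans ?_⟩
    · rw [show (pvScanRowB b cols i (m, found)).1 =
          ((List.range' 1 cols).foldl (pvScanRowStep b cols i) (m, found, 0)).1 from rfl,
        hg1 a c]
      constructor
      · rintro (h | ⟨k, -, hg, hp⟩)
        · exact Or.inl h
        · simp only [Prod.mk.injEq] at hp
          obtain ⟨rfl, rfl⟩ := hp
          exact Or.inr ⟨rfl, hg⟩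
      · rintro (h | ⟨ha, hg⟩)
        · exact Or.inl h
        · exact Or.inr ⟨c, by omega, hg, by rw [ha]⟩
    · constructor
      · rintro (h | ⟨k, -, hg⟩)
        · exact Or.inl h
        · exact Or.inr ⟨k, hg⟩
      · rintro (h | ⟨k, hg⟩)
        · exact Or.inl h
        · exact Or.inr ⟨k, by omega, hg⟩

lemma pvScanColB_spec (b : List (List Int)) (rows cols j : Nat) (hj : j < cols)
    (m : List (List Bool)) (found : Bool) (hm : MS rows cols m) :
    MS rows cols (pvScanColB b rows j (m, found)).1 ∧
    (∀ a c, pvMget (pvScanColB b rows j (m, found)).1 a c = true ↔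
      pvMget m a c = true ∨ (c = j ∧ genHP (fun k => pvCell b k j) rows a)) ∧
    ((pvScanColB b rows j (m, found)).2 = true ↔
      found = true ∨ ∃ k, genHP (fun k => pvCell b k j) rows k) := by
  rcases Nat.eq_zero_or_pos rows with hc | hc
  · subst hc
    refine ⟨hm, fun a c => ?_, ?_⟩
    · show pvMget m a c = true ↔ _
      constructor
      · exact fun h => Or.inl h
      · rintro (h | ⟨-, hg⟩)
        · exact h
        · exact absurd (genHP_lt _ 0 a hg) (by omega)
    · show found = true ↔ _
      constructor
      · exact fun h => Or.inl h
      · rintro (h | ⟨k, hg⟩)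
        · exact h
        · exact absurd (genHP_lt _ 0 k hg) (by omega)
  · obtain ⟨hS1, hg1, hf1⟩ := scan_go pvMget (fun m k => pvMset m k j) (fun k => (k, j))
      (MS rows cols) rows (fun k => pvCell b k j) (pvScanColStep b rows j)
      (fun m k hm hk => MS_pvMset rows cols m k j hm)
      (fun m k a c hm hk => by
        have := pvMget_pvMset_char rows cols m k j a c hm hk hj
        exact this)
      (fun st j => rfl)
      rows 1 m found 0 (by omega) (by omega) (by omega) (by omega)
      (fun x hx1 hx2 => by rw [show x = 0 from by omega])
      (Or.inl rfl) hm
    refine ⟨hS1, fun a c => ?_, hf1.trans ?_⟩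
    · rw [show (pvScanColB b rows j (m, found)).1 =
          ((List.range' 1 rows).foldl (pvScanColStep b rows j) (m, found, 0)).1 from rfl,
        hg1 a c]
      constructor
      · rintro (h | ⟨k, -, hg, hp⟩)
        · exact Or.inl h
        · simp only [Prod.mk.injEq] at hp
          obtain ⟨rfl, rfl⟩ := hp
          exact Or.inr ⟨rfl, hg⟩
      · rintro (h | ⟨hcj, hg⟩)
        · exact Or.inl h
        · exact Or.inr ⟨a, by omega, hg, by rw [hcj]⟩
    · constructor
      · rintro (h | ⟨k, -, hg⟩)
        · exact Or.inl h
        · exact Or.inr ⟨k, hg⟩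
      · rintro (h | ⟨k, hg⟩)
        · exact Or.inl h
        · exact Or.inr ⟨k, by omega, hg⟩

lemma pvMget_init (rows cols a c : Nat) :
    pvMget (List.replicate rows (List.replicate cols false)) a c = false := by
  unfold pvMget
  simp [List.getD_eq_getElem?_getD, List.getElem?_replicate]
  split_ifs <;> simp

lemma pvDetectB_spec (b : List (List Int)) (rows cols : Nat) :
    MS rows cols (pvDetectB b rows cols).1 ∧
    (∀ a c, pvMget (pvDetectB b rows cols).1 a c = true ↔ MarkP b rows cols a c) ∧
    ((pvDetectB b rows cols).2 = true ↔ ∃ a c, MarkP b rows cols a c) := by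
  have hrows : ∀ n, n ≤ rows →
      MS rows cols ((List.range n).foldl (fun st i => pvScanRowB b cols i st)
        (List.replicate rows (List.replicate cols false), false)).1 ∧
      (∀ a c, pvMget ((List.range n).foldl (fun st i => pvScanRowB b cols i st)
          (List.replicate rows (List.replicate cols false), false)).1 a c = true ↔
        (a < n ∧ genHP (fun k => pvCell b a k) cols c)) ∧
      (((List.range n).foldl (fun st i => pvScanRowB b cols i st)
          (List.replicate rows (List.replicate cols false), false)).2 = true ↔
        ∃ i, i < n ∧ ∃ k, genHP (fun k => pvCell b i k) cols k) := by
    intro n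
    induction n with
    | zero =>
      intro _
      refine ⟨MS_init rows cols, fun a c => ?_, ?_⟩
      · simp [pvMget_init]
      · simp
    | succ n ih =>
      intro hn
      obtain ⟨ihS, ihg, ihf⟩ := ih (by omega)
      rw [List.range_succ, List.foldl_append, List.foldl_cons, List.foldl_nil]
      obtain ⟨hS', hg', hf'⟩ := pvScanRowB_spec b rows cols n (by omega)
        ((List.range n).foldl (fun st i => pvScanRowB b cols i st)
          (List.replicate rows (List.replicate cols false), false)).1
        ((List.range n).foldl (fun st i => pvScanRowB b cols i st)
          (List.replicate rows (List.replicate cols false), false)).2 ihS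
      refine ⟨hS', fun a c => ?_, ?_⟩
      · rw [(hg' a c : _), ihg a c]
        constructor
        · rintro (⟨h1, h2⟩ | ⟨rfl, hg⟩)
          · exact ⟨by omega, h2⟩
          · exact ⟨by omega, hg⟩
        · rintro ⟨h1, h2⟩
          by_cases han : a = n
          · subst han; exact Or.inr ⟨rfl, h2⟩
          · exact Or.inl ⟨by omega, h2⟩
      · rw [(hf' : _), ihf]
        constructor
        · rintro (⟨i, h1, h2⟩ | ⟨k, hg⟩)
          · exact ⟨i, by omega, h2⟩
          · exact ⟨n, by omega, k, hg⟩
        · rintro ⟨i, h1, k, hg⟩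
          by_cases hin : i = n
          · subst hin; exact Or.inr ⟨k, hg⟩
          · exact Or.inl ⟨i, by omega, k, hg⟩
  obtain ⟨h1S, h1g, h1f⟩ := hrows rows (le_refl _)
  have hcols : ∀ n, n ≤ cols →
      MS rows cols ((List.range n).foldl (fun st j => pvScanColB b rows j st)
        ((List.range rows).foldl (fun st i => pvScanRowB b cols i st)
          (List.replicate rows (List.replicate cols false), false))).1 ∧
      (∀ a c, pvMget ((List.range n).foldl (fun st j => pvScanColB b rows j st)
          ((List.range rows).foldl (fun st i => pvScanRowB b cols i st)
            (List.replicate rows (List.replicate cols false), false))).1 a c = true ↔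
        ((a < rows ∧ genHP (fun k => pvCell b a k) cols c) ∨
         (c < n ∧ genHP (fun k => pvCell b k c) rows a))) ∧
      (((List.range n).foldl (fun st j => pvScanColB b rows j st)
          ((List.range rows).foldl (fun st i => pvScanRowB b cols i st)
            (List.replicate rows (List.replicate cols false), false))).2 = true ↔
        ((∃ i, i < rows ∧ ∃ k, genHP (fun k => pvCell b i k) cols k) ∨
         (∃ j, j < n ∧ ∃ k, genHP (fun k => pvCell b k j) rows k))) := by
    intro n
    induction n with
    | zero =>
      intro _
      rw [List.range_zero, List.foldl_nil]
      refine ⟨h1S, fun a c => ?_, ?_⟩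
      · rw [h1g a c]
        constructor
        · exact fun h => Or.inl h
        · rintro (h | ⟨h1, -⟩)
          · exact h
          · omega
      · rw [h1f]
        constructor
        · exact fun h => Or.inl h
        · rintro (h | ⟨j, h1, -⟩)
          · exact h
          · omega
    | succ n ih =>
      intro hn
      obtain ⟨ihS, ihg, ihf⟩ := ih (by omega)
      rw [List.range_succ, List.foldl_append, List.foldl_cons, List.foldl_nil]
      obtain ⟨hS', hg', hf'⟩ := pvScanColB_spec b rows cols n (by omega)
        ((List.range n).foldl (fun st j => pvScanColB b rows j st)
          ((List.range rows).foldl (fun st i => pvScanRowB b cols i st)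
            (List.replicate rows (List.replicate cols false), false))).1
        ((List.range n).foldl (fun st j => pvScanColB b rows j st)
          ((List.range rows).foldl (fun st i => pvScanRowB b cols i st)
            (List.replicate rows (List.replicate cols false), false))).2 ihS
      refine ⟨hS', fun a c => ?_, ?_⟩
      · rw [(hg' a c : _), ihg a c]
        constructor
        · rintro ((h | ⟨h1, h2⟩) | ⟨rfl, hg⟩)
          · exact Or.inl h
          · exact Or.inr ⟨by omega, h2⟩
          · exact Or.inr ⟨by omega, hg⟩
        · rintro (h | ⟨h1, h2⟩)
          · exact Or.inl (Or.inl h)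
          · by_cases hcn : c = n
            · subst hcn; exact Or.inr ⟨rfl, h2⟩
            · exact Or.inl (Or.inr ⟨by omega, h2⟩)
      · rw [(hf' : _), ihf]
        constructor
        · rintro ((h | ⟨j, h1, h2⟩) | ⟨k, hg⟩)
          · exact Or.inl h
          · exact Or.inr ⟨j, by omega, h2⟩
          · exact Or.inr ⟨n, by omega, k, hg⟩
        · rintro (h | ⟨j, h1, k, hg⟩)
          · exact Or.inl (Or.inl h)
          · by_cases hjn : j = n
            · subst hjn; exact Or.inr ⟨k, hg⟩
            · exact Or.inl (Or.inr ⟨j, by omega, k, hg⟩)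
  obtain ⟨h2S, h2g, h2f⟩ := hcols cols (le_refl _)
  refine ⟨h2S, fun a c => h2g a c, Iff.trans h2f ?_⟩
  · unfold MarkP
    constructor
    · rintro (⟨i, h1, k, hg⟩ | ⟨j, h1, k, hg⟩)
      · exact ⟨i, k, Or.inl ⟨h1, hg⟩⟩
      · exact ⟨k, j, Or.inr ⟨h1, hg⟩⟩
    · rintro ⟨a, c, (⟨h1, hg⟩ | ⟨h1, hg⟩)⟩
      · exact Or.inl ⟨a, h1, c, hg⟩
      · exact Or.inr ⟨c, h1, a, hg⟩

def colL (b : List (List Int)) (j : Nat) : List Int := b.map (fun r => r.getD j 0)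

lemma colL_length (b : List (List Int)) (j : Nat) : (colL b j).length = b.length := by
  simp [colL]

lemma pvCell_colL (b : List (List Int)) (a j : Nat) : pvCell b a j = (colL b j).getD a 0 := by
  unfold pvCell colL
  by_cases h : a < b.length
  · simp [List.getD_eq_getElem?_getD, List.getElem?_map, List.getElem?_eq_getElem h]
  · simp [List.getD_eq_getElem?_getD, List.getElem?_map,
      List.getElem?_eq_none (show b.length ≤ a by omega)]

lemma listI_ext (l1 l2 : List Int) (hl : l1.length = l2.length)
    (h : ∀ p, l1.getD p 0 = l2.getD p 0) : l1 = l2 := by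
  apply List.ext_getElem hl
  intro p h1 h2
  have := h p
  rwa [List.getD_eq_getElem?_getD, List.getD_eq_getElem?_getD, List.getElem?_eq_getElem h1,
    List.getElem?_eq_getElem h2, Option.getD_some, Option.getD_some] at this

lemma colL_pvSet2_same (b : List (List Int)) (a j : Nat) (x : Int)
    (hb : a < b.length → j < (b.getD a []).length) :
    colL (pvSet2 b a j x) j = (colL b j).set a x := by
  by_cases h : a < b.length
  · apply listI_ext _ _ (by simp [colL, pvSet2])
    intro p
    rw [← pvCell_colL, pvCell_pvSet2]
    by_cases hap : a = p
    · subst hap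
      rw [if_pos ⟨rfl, rfl, h, hb h⟩, List.getD_eq_getElem?_getD,
        List.getElem?_set_self (by rwa [colL_length]), Option.getD_some]
    · rw [if_neg (by tauto), pvCell_colL, List.getD_eq_getElem?_getD, List.getD_eq_getElem?_getD,
        List.getElem?_set_ne (by omega)]
  · unfold pvSet2
    rw [List.set_eq_of_length_le (by omega), List.set_eq_of_length_le (by rw [colL_length]; omega)]

lemma getD_append_lt (A B : List Int) (n : Nat) (h : n < A.length) :
    (A ++ B).getD n 0 = A.getD n 0 :=
  List.getD_append _ _ _ _ h

lemma getD_append_ge (A B : List Int) (n : Nat) (h : A.length ≤ n) :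
    (A ++ B).getD n 0 = B.getD (n - A.length) 0 := by
  rw [List.getD_eq_getElem?_getD, List.getElem?_append, if_neg (by omega),
    ← List.getD_eq_getElem?_getD]

lemma getD_replicate_zero (z p : Nat) : (List.replicate z (0:Int)).getD p 0 = 0 := by
  rw [List.getD_eq_getElem?_getD, List.getElem?_replicate]
  split <;> rfl

lemma replicate_set_last (z : Nat) (hz : 0 < z) (v : Int) :
    (List.replicate z (0:Int)).set (z-1) v = List.replicate (z-1) 0 ++ [v] := by
  have : List.replicate z (0:Int) = List.replicate (z-1) 0 ++ [0] := by
    rw [← List.replicate_succ']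
    congr 1
    omega
  rw [this, List.set_append_right _ _ (by simp), List.length_replicate, Nat.sub_self]
  rfl

lemma dropA_go (j : Nat) (b0 : List (List Int)) (rows : Nat) (hrows : rows = b0.length)
    (hj : ∀ a, a < rows → j < (b0.getD a []).length) :
    ∀ (m : Nat), m ≤ rows → ∀ (b : List (List Int)) (z : Nat),
      shp b = shp b0 →
      (∀ a c, c ≠ j → pvCell b a c = pvCell b0 a c) →
      colL b j = (colL b0 j).take m ++ List.replicate z 0 ++
        ((colL b0 j).drop m).filter (fun x => x ≠ 0) →
      m + z + (((colL b0 j).drop m).filter (fun x => x ≠ 0)).length = rows →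
      shp ((List.range m).reverse.foldl (pvDropStepA j) (b, m + z - 1)).1 = shp b0 ∧
      (∀ a c, c ≠ j → pvCell ((List.range m).reverse.foldl (pvDropStepA j) (b, m + z - 1)).1 a c = pvCell b0 a c) ∧
      colL ((List.range m).reverse.foldl (pvDropStepA j) (b, m + z - 1)).1 j =
        List.replicate (rows - (((colL b0 j)).filter (fun x => x ≠ 0)).length) 0 ++
          (colL b0 j).filter (fun x => x ≠ 0) := by
  intro m
  induction m with
  | zero =>
    intro _ b z hshp hoth hcol hz
    simp only [List.drop_zero] at hcol hz
    simp only [List.range_zero, List.reverse_nil, List.foldl_nil]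
    refine ⟨hshp, hoth, ?_⟩
    rw [hcol]
    simp only [List.take_zero, List.nil_append]
    have : z = rows - ((colL b0 j).filter (fun x => x ≠ 0)).length := by omega
    rw [this]
  | succ m ih =>
    intro hm b z hshp hoth hcol hz
    have hlb : b.length = b0.length := by
      have := congrArg List.length hshp; simpa [shp] using this
    have hcollen : (colL b0 j).length = rows := by rw [colL_length]; omega
    have hmrows : m < rows := by omega
    have hvm : m < (colL b0 j).length := by omega
    set v := (colL b0 j)[m] with hv
    have htake : (colL b0 j).take (m+1) = (colL b0 j).take m ++ [v] := by
      rw [List.take_add_one, List.getElem?_eq_getElem hvm]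
      rfl
    have hdrop : (colL b0 j).drop m = v :: (colL b0 j).drop (m+1) := List.drop_eq_getElem_cons hvm
    have hTlen : ((colL b0 j).take m).length = m := by
      rw [List.length_take]; omega
    have hrowlen : ∀ a, a < rows → j < (b.getD a []).length := by
      intro a ha
      rw [rowlen_shape]
      have e : (List.map List.length b) = List.map List.length b0 := hshp
      rw [e, ← rowlen_shape]
      exact hj a ha
    have hcol' : colL b j = ((colL b0 j).take m ++ [v]) ++
        (List.replicate z 0 ++ ((colL b0 j).drop (m+1)).filter (fun x => x ≠ 0)) := by
      rw [hcol, htake]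
      simp [List.append_assoc]
    have hcellm : pvCell b m j = v := by
      rw [pvCell_colL, hcol', getD_append_lt _ _ _ (by simp [hTlen]),
        getD_append_ge _ _ _ (by omega), hTlen, Nat.sub_self]
      rfl
    have hrange : (List.range (m+1)).reverse = m :: (List.range m).reverse := by
      rw [List.range_succ]
      simp
    have hidx : m + 1 + z - 1 = m + z := by omega
    rw [hrange, List.foldl_cons, hidx]
    have hstepred : pvDropStepA j (b, m + z) m =
        (if pvCell b m j ≠ 0 then
          (pvSet2 (pvSet2 b m j (pvCell b (m + z) j)) (m + z) j (pvCell b m j), m + z - 1)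
        else (b, m + z)) := rfl
    rw [hstepred]
    by_cases hvz : v = 0
    · rw [if_neg (by rw [hcellm, hvz]; simp)]
      have hfe : ((colL b0 j).drop m).filter (fun x => x ≠ 0) =
          ((colL b0 j).drop (m+1)).filter (fun x => x ≠ 0) := by
        rw [hdrop, List.filter_cons, hvz]
        simp
      have hcolm : colL b j = (colL b0 j).take m ++ List.replicate (z+1) 0 ++
          ((colL b0 j).drop m).filter (fun x => x ≠ 0) := by
        rw [hcol', hfe, hvz, List.replicate_succ]
        simp [List.append_assoc]
      have hzm : m + (z+1) + (((colL b0 j).drop m).filter (fun x => x ≠ 0)).length = rows := by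
        rw [hfe]
        omega
      have := ih (by omega) b (z+1) hshp hoth hcolm hzm
      have e2 : m + (z + 1) - 1 = m + z := by omega
      rwa [e2] at this
    · rw [if_pos (by rw [hcellm]; simpa using hvz)]
      -- the swap: board[m][j] gets the zero (or v itself if z = 0), board[m+z][j] gets v
      have hmz : m + z < rows := by omega
      have hfd : ((colL b0 j).drop m).filter (fun x => x ≠ 0) =
          v :: ((colL b0 j).drop (m+1)).filter (fun x => x ≠ 0) := by
        rw [hdrop, List.filter_cons]
        simp [hvz]
      have hshp2 : shp (pvSet2 (pvSet2 b m j (pvCell b (m + z) j)) (m + z) j (pvCell b m j)) = shp b0 := by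
        rw [shp_pvSet2, shp_pvSet2]; exact hshp
      have hoth2 : ∀ a c, c ≠ j → pvCell (pvSet2 (pvSet2 b m j (pvCell b (m + z) j)) (m + z) j (pvCell b m j)) a c = pvCell b0 a c := by
        intro a c hc
        rw [pvCell_pvSet2, if_neg (by tauto), pvCell_pvSet2, if_neg (by tauto)]
        exact hoth a c hc
      have hcol2 : colL (pvSet2 (pvSet2 b m j (pvCell b (m + z) j)) (m + z) j (pvCell b m j)) j =
          ((colL b j).set m (pvCell b (m + z) j)).set (m + z) (pvCell b m j) := by
        rw [colL_pvSet2_same _ _ _ _ (fun h => by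
            rw [rowlen_pvSet2]
            exact hrowlen (m+z) hmz),
          colL_pvSet2_same _ _ _ _ (fun h => hrowlen m hmrows)]
      have hcolm : ((colL b j).set m (pvCell b (m + z) j)).set (m + z) (pvCell b m j) =
          (colL b0 j).take m ++ List.replicate z 0 ++
            ((colL b0 j).drop m).filter (fun x => x ≠ 0) := by
        rw [hcellm, hfd]
        rcases Nat.eq_zero_or_pos z with hz0 | hz0
        · subst hz0
          simp only [Nat.add_zero]
          have hq : pvCell b m j = v := hcellm
          rw [hq, hcol']
          rw [List.set_append, if_pos (by simp [hTlen] <;> omega),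
            List.set_append_right _ _ (le_of_eq hTlen), hTlen, Nat.sub_self]
          rw [List.set_append, if_pos (by simp [hTlen] <;> omega),
            List.set_append_right _ _ (le_of_eq hTlen), hTlen, Nat.sub_self]
          simp [List.append_assoc]
        · have hq : pvCell b (m + z) j = 0 := by
            rw [pvCell_colL, hcol',
              getD_append_ge _ _ _ (by simp [hTlen] <;> omega),
              getD_append_lt _ _ _ (by simp [hTlen] <;> omega)]
            rw [show m + z - ((colL b0 j).take m ++ [v]).length = z - 1 by simp [hTlen] <;> omega]
            exact getD_replicate_zero _ _
          rw [hq, hcol']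
          rw [List.set_append, if_pos (by simp [hTlen] <;> omega),
            List.set_append_right _ _ (le_of_eq hTlen), hTlen, Nat.sub_self]
          rw [show ([v].set 0 (0:Int)) = [(0:Int)] from rfl]
          rw [List.set_append, if_neg (by simp [hTlen] <;> omega)]
          rw [show m + z - ((colL b0 j).take m ++ [(0:Int)]).length = z - 1 by simp [hTlen] <;> omega]
          rw [List.set_append, if_pos (by simp <;> omega), replicate_set_last z hz0 v]
          have hrep : List.replicate z (0:Int) = 0 :: List.replicate (z-1) 0 := by
            rw [← List.replicate_succ]
            congr 1
            omega
          rw [hrep]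
          simp [List.append_assoc]
      have hzm : m + z + (((colL b0 j).drop m).filter (fun x => x ≠ 0)).length = rows := by
        rw [hfd, List.length_cons]
        omega
      have := ih (by omega) (pvSet2 (pvSet2 b m j (pvCell b (m + z) j)) (m + z) j (pvCell b m j)) z
        hshp2 hoth2 (by rw [hcol2, hcolm]) hzm
      exact this

lemma pvDropColA_spec (b : List (List Int)) (rows j : Nat) (hrows : rows = b.length)
    (hj : ∀ a, a < rows → j < (b.getD a []).length) :
    shp (pvDropColA b rows j) = shp b ∧
    (∀ a c, c ≠ j → pvCell (pvDropColA b rows j) a c = pvCell b a c) ∧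
    colL (pvDropColA b rows j) j =
      List.replicate (rows - ((colL b j).filter (fun x => x ≠ 0)).length) 0 ++
        (colL b j).filter (fun x => x ≠ 0) := by
  have hcl : (colL b j).length = rows := by rw [colL_length]; omega
  have h := dropA_go j b rows hrows hj rows (le_refl _) b 0 rfl (fun _ _ _ => rfl)
    (by rw [List.take_of_length_le (by omega), List.drop_eq_nil_of_le (by omega)]; simp)
    (by rw [List.drop_eq_nil_of_le (by omega)]; simp <;> omega)
  have e : rows + 0 - 1 = rows - 1 := by omega
  rw [e] at h
  exact h

lemma dropB_write (b : List (List Int)) (rows j : Nat) (hrows : rows = b.length)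
    (hj : ∀ a, a < rows → j < (b.getD a []).length) (w : Nat → Int) :
    ∀ n, n ≤ rows →
      shp ((List.range n).foldl (fun b i => pvSet2 b i j (w i)) b) = shp b ∧
      ∀ a c, pvCell ((List.range n).foldl (fun b i => pvSet2 b i j (w i)) b) a c =
        if a < n ∧ c = j then w a else pvCell b a c := by
  intro n
  induction n with
  | zero => intro _; simp
  | succ n ih =>
    intro hn
    obtain ⟨ihs, ihc⟩ := ih (by omega)
    rw [List.range_succ, List.foldl_append, List.foldl_cons, List.foldl_nil]
    have hlen : ((List.range n).foldl (fun b i => pvSet2 b i j (w i)) b).length = b.length := by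
      have := congrArg List.length ihs; simpa [shp] using this
    have hrow : ∀ a', (((List.range n).foldl (fun b i => pvSet2 b i j (w i)) b).getD a' []).length = (b.getD a' []).length := by
      intro a'
      rw [rowlen_shape, rowlen_shape]
      exact congrArg (fun l => l.getD a' 0) ihs
    refine ⟨by rw [shp_pvSet2]; exact ihs, fun a c => ?_⟩
    rw [pvCell_pvSet2, hlen, hrow, ihc]
    by_cases hna : n = a
    · subst hna
      by_cases hcj : j = c
      · subst hcj
        rw [if_pos ⟨rfl, rfl, by omega, hj n (by omega)⟩, if_pos (show n < n + 1 ∧ j = j from ⟨by omega, rfl⟩)]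
      · rw [if_neg (by tauto), if_neg (by tauto), if_neg (by tauto)]
    · by_cases hC : a < n ∧ c = j
      · rw [if_neg (by tauto), if_pos hC, if_pos ⟨by omega, hC.2⟩]
      · rw [if_neg (by tauto), if_neg hC, if_neg (by rintro ⟨h1, h2⟩; exact hC ⟨by omega, h2⟩)]

lemma pvDropColB_spec (b : List (List Int)) (rows j : Nat) (hrows : rows = b.length)
    (hj : ∀ a, a < rows → j < (b.getD a []).length) :
    shp (pvDropColB b rows j) = shp b ∧
    (∀ a c, c ≠ j → pvCell (pvDropColB b rows j) a c = pvCell b a c) ∧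
    colL (pvDropColB b rows j) j =
      List.replicate (rows - ((colL b j).filter (fun x => x ≠ 0)).length) 0 ++
        (colL b j).filter (fun x => x ≠ 0) := by
  have hmap : (List.range rows).map (fun i => pvCell b i j) = colL b j := by
    apply List.ext_getElem (by simp [colL]; omega)
    intro p h1 h2
    simp only [List.getElem_map, List.getElem_range]
    rw [pvCell_colL, List.getD_eq_getElem?_getD, List.getElem?_eq_getElem h2, Option.getD_some]
  have hcl : (colL b j).length = rows := by rw [colL_length]; omega
  have hKle : ((colL b j).filter (fun x => x ≠ 0)).length ≤ rows := by
    calc ((colL b j).filter (fun x => x ≠ 0)).length ≤ (colL b j).length := List.length_filter_le _ _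
    _ = rows := hcl
  have hpadlen : (List.replicate (rows - ((colL b j).filter (fun x => x ≠ 0)).length) (0:Int) ++
      (colL b j).filter (fun x => x ≠ 0)).length = rows := by
    rw [List.length_append, List.length_replicate]
    omega
  have hD : pvDropColB b rows j = (List.range rows).foldl
      (fun b' i => pvSet2 b' i j
        ((List.replicate (rows - (((List.range rows).map (fun i => pvCell b i j)).filter (fun x => x ≠ 0)).length) (0:Int) ++
          ((List.range rows).map (fun i => pvCell b i j)).filter (fun x => x ≠ 0)).getD i 0)) b := rfl
  rw [hD, hmap]
  obtain ⟨hs, hc⟩ := dropB_write b rows j hrows hj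
    (fun i => (List.replicate (rows - ((colL b j).filter (fun x => x ≠ 0)).length) (0:Int) ++
      (colL b j).filter (fun x => x ≠ 0)).getD i 0) rows (le_refl _)
  refine ⟨hs, fun a c hcj => ?_, ?_⟩
  · rw [hc a c, if_neg (by tauto)]
  · refine listI_ext _ _ ?_ ?_
    · rw [colL_length, hpadlen]
      have := congrArg List.length hs
      simp only [shp, List.length_map] at this
      omega
    intro p
    rw [← pvCell_colL, hc p j]
    by_cases hp : p < rows
    · rw [if_pos ⟨hp, rfl⟩]
    · rw [if_neg (by tauto), pvCell_colL, List.getD_eq_getElem?_getD,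
        List.getElem?_eq_none (by rw [hcl]; omega), List.getD_eq_getElem?_getD,
        List.getElem?_eq_none (by rw [hpadlen]; omega)]

lemma pvDropCol_eq (b : List (List Int)) (rows j : Nat) (hrows : rows = b.length)
    (hj : ∀ a, a < rows → j < (b.getD a []).length) :
    pvDropColA b rows j = pvDropColB b rows j := by
  obtain ⟨hsa, hoa, hca⟩ := pvDropColA_spec b rows j hrows hj
  obtain ⟨hsb, hob, hcb⟩ := pvDropColB_spec b rows j hrows hj
  apply pvBoard_ext _ _ (hsa.trans hsb.symm)
  intro a c
  by_cases hcj : c = j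
  · subst hcj
    rw [pvCell_colL, pvCell_colL, hca, hcb]
  · rw [hoa a c hcj, hob a c hcj]

lemma markP_bounds (b : List (List Int)) (rows cols a c : Nat)
    (h : MarkP b rows cols a c) : a < rows ∧ c < cols := by
  rcases h with ⟨h1, h2⟩ | ⟨h1, h2⟩
  · exact ⟨h1, genHP_lt _ _ _ h2⟩
  · exact ⟨genHP_lt _ _ _ h2, h1⟩

lemma zero_eq (b : List (List Int)) (rows cols : Nat) (hrows : rows = b.length) :
    pvZeroA b (pvCrushA b rows cols) = pvZeroB b (pvDetectB b rows cols).1 rows cols ∧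
    shp (pvZeroA b (pvCrushA b rows cols)) = shp b := by
  obtain ⟨hms, hmg, -⟩ := pvDetectB_spec b rows cols
  constructor
  · apply pvBoard_ext _ _ ((shp_pvZeroA _ _).trans ((pvZeroB_spec b _ rows cols 0 0).1).symm)
    intro a c
    rw [pvCell_pvZeroA, (pvZeroB_spec b _ rows cols a c).2]
    by_cases hM : MarkP b rows cols a c ∧ a < b.length ∧ c < (b.getD a []).length
    · rw [if_pos ⟨(mem_pvCrushA b rows cols (a,c)).mpr hM.1, hM.2⟩,
        if_pos ⟨⟨(markP_bounds b rows cols a c hM.1).1, (markP_bounds b rows cols a c hM.1).2,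
          (hmg a c).mpr hM.1⟩, hM.2⟩]
    · rw [if_neg (fun hcon => hM ⟨(mem_pvCrushA b rows cols (a,c)).mp hcon.1, hcon.2⟩),
        if_neg (fun hcon => hM ⟨(hmg a c).mp hcon.1.2.2, hcon.2⟩)]
  · exact shp_pvZeroA _ _

lemma gravity_eq (b : List (List Int)) (rows cols : Nat) (hrows : rows = b.length)
    (hc : ∀ a, a < rows → cols ≤ (b.getD a []).length) :
    pvGravityA b rows cols = pvGravityB b rows cols ∧ shp (pvGravityA b rows cols) = shp b := by
  unfold pvGravityA pvGravityB
  have main : ∀ n, n ≤ cols →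
      (List.range n).foldl (fun b j => pvDropColA b rows j) b =
        (List.range n).foldl (fun b j => pvDropColB b rows j) b ∧
      shp ((List.range n).foldl (fun b j => pvDropColA b rows j) b) = shp b := by
    intro n
    induction n with
    | zero => intro _; exact ⟨rfl, rfl⟩
    | succ n ih =>
      intro hn
      obtain ⟨ihe, ihs⟩ := ih (by omega)
      rw [List.range_succ, List.foldl_append, List.foldl_append, List.foldl_cons,
        List.foldl_cons, List.foldl_nil, List.foldl_nil, ← ihe]
      have hlen : ((List.range n).foldl (fun b j => pvDropColA b rows j) b).length = b.length := by
        have := congrArg List.length ihs; simpa [shp] using this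
      have hrows' : rows = ((List.range n).foldl (fun b j => pvDropColA b rows j) b).length := by omega
      have hj' : ∀ a, a < rows → n < (((List.range n).foldl (fun b j => pvDropColA b rows j) b).getD a []).length := by
        intro a ha
        rw [rowlen_shape]
        have e : (List.map List.length ((List.range n).foldl (fun b j => pvDropColA b rows j) b)) = List.map List.length b := ihs
        rw [e, ← rowlen_shape]
        have := hc a ha
        omega
      obtain ⟨hsa, -, -⟩ := pvDropColA_spec ((List.range n).foldl (fun b j => pvDropColA b rows j) b) rows n hrows' hj'
      exact ⟨pvDropCol_eq _ rows n hrows' hj', hsa.trans ihs⟩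
  exact (main cols (le_refl _))

lemma rowlen_ge (b0 b : List (List Int)) (hshp : shp b = shp b0)
    (hpre : ∀ r ∈ b0, (b0.headI).length ≤ r.length) :
    ∀ a, a < b0.length → (b0.headI).length ≤ (b.getD a []).length := by
  intro a ha
  rw [rowlen_shape]
  have e : (List.map List.length b) = List.map List.length b0 := hshp
  rw [e, ← rowlen_shape]
  have hmem : b0.getD a [] ∈ b0 := by
    rw [List.getD_eq_getElem?_getD, List.getElem?_eq_getElem ha]
    exact List.getElem_mem ha
  exact hpre _ hmem

lemma loop_eq (b0 : List (List Int))
    (hpre : ∀ r ∈ b0, (b0.headI).length ≤ r.length) :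
    ∀ fuel b, shp b = shp b0 → pvLoopA fuel b = pvLoopB b0.length (b0.headI).length fuel b := by
  intro fuel
  induction fuel with
  | zero => intro b _; rfl
  | succ fuel ih =>
    intro b hshp
    have hlen : b.length = b0.length := by
      have := congrArg List.length hshp; simpa [shp] using this
    have hhead : (b.headI).length = (b0.headI).length := by
      cases b with
      | nil =>
        have hb0 : b0 = [] := by
          have : shp b0 = [] := by rw [← hshp]; rfl
          simpa [shp] using this
        rw [hb0]
      | cons r t =>
        cases b0 with
        | nil =>
          exfalso
          have : shp (r :: t) = shp ([] : List (List Int)) := hshp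
          simp [shp] at this
        | cons r0 t0 =>
          have : r.length = r0.length := by
            have := congrArg (fun l => l.headI) hshp
            simpa [shp] using this
          simpa using this
    have hstepA : pvLoopA (fuel+1) b =
        (if (pvCrushA b b.length (b.headI).length).isEmpty then b
         else pvLoopA fuel (pvGravityA (pvZeroA b (pvCrushA b b.length (b.headI).length)) b.length (b.headI).length)) := rfl
    have hstepB : pvLoopB b0.length (b0.headI).length (fuel+1) b =
        (if (pvDetectB b b0.length (b0.headI).length).2 = false then b
         else pvLoopB b0.length (b0.headI).length fuel
           (pvGravityB (pvZeroB b (pvDetectB b b0.length (b0.headI).length).1 b0.length (b0.headI).length) b0.length (b0.headI).length)) := rfl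
    rw [hstepA, hstepB, hlen, hhead]
    obtain ⟨-, -, hdf⟩ := pvDetectB_spec b b0.length (b0.headI).length
    by_cases hex : ∃ a c, MarkP b b0.length (b0.headI).length a c
    · rw [if_neg (by
          rw [List.isEmpty_iff]
          intro hcon
          obtain ⟨a, c, hM⟩ := hex
          have := (mem_pvCrushA b b0.length (b0.headI).length (a,c)).mpr hM
          rw [hcon] at this
          exact List.not_mem_nil this),
        if_neg (by
          rw [hdf.mpr hex]
          simp)]
      obtain ⟨hze, hzs⟩ := zero_eq b b0.length (b0.headI).length (by omega)
      set bz := pvZeroA b (pvCrushA b b0.length (b0.headI).length) with hbz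
      have hzs0 : shp bz = shp b0 := hzs.trans hshp
      have hzlen : bz.length = b0.length := by
        have := congrArg List.length hzs0; simpa [shp] using this
      obtain ⟨hge, hgs⟩ := gravity_eq bz b0.length (b0.headI).length (by omega)
        (fun a ha => rowlen_ge b0 bz hzs0 hpre a ha)
      rw [← hze, ← hge]
      exact ih (pvGravityA bz b0.length (b0.headI).length) (hgs.trans hzs0)
    · rw [if_pos (by
          rw [List.isEmpty_iff, List.eq_nil_iff_forall_not_mem]
          intro p hp
          exact hex ⟨p.1, p.2, (mem_pvCrushA b b0.length (b0.headI).length p).mp hp⟩),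
        if_pos (by
          rcases h : (pvDetectB b b0.length (b0.headI).length).2 with _ | _
          · rfl
          · exact absurd (hdf.mp h) hex)]

-- ===== VERDICT (by name: the statement is the Claim_ definition above) =====
theorem solution_spec : Claim_equal_solution := by
  intro board _ hpre
  unfold Spec_solution solution solution_alt
  exact loop_eq board hpre _ board rfl
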